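-- pv_equiv track=rewrite | github.com/HAHAHAHA123456/MyUtils | LeTou_StaticFunc.py | staticCounts_Continous_leaveOut
-- ===== SOURCE A (Python) =====
-- def staticCounts_Continous_leaveOut(dataList, number):
--     idx = 0
--     countsNumber = 0
--     continousNumber = 0
--     leave_outNumber = 0
--     maxContinous = 0
--     maxLeaveNumber = 0
--     while idx < len(dataList):
--         if number in dataList[idx]:
--             countsNumber += 1
--             continousNumber += 1
--             leave_outNumber = 0
--             if continousNumber > maxContinous:
--                 maxContinous = continousNumber
--         else:
--             continousNumber = 0
--             leave_outNumber += 1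
--             if leave_outNumber > maxLeaveNumber:
--                 maxLeaveNumber = leave_outNumber
--         idx += 1
--     return countsNumber, maxContinous, maxLeaveNumber
-- ===== SOURCE B (Python) =====
-- def staticCounts_Continous_leaveOut(dataList, number):
--     # run-length-encode the membership sequence, then aggregate over the runs
--     matches = [number in x for x in dataList]
--     runs = []  # (key, length) pairs, most recent run first
--     for m in matches:
--         if runs and runs[0][0] == m:
--             runs[0] = (m, runs[0][1] + 1)
--         else:
--             runs.insert(0, (m, 1))
--     count = sum(l for k, l in runs if k)
--     maxContinous = max((l for k, l in runs if k), default=0)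
--     maxLeaveNumber = max((l for k, l in runs if not k), default=0)
--     return count, maxContinous, maxLeaveNumber
-- ===== Notes on version B (the rewrite author's own statement) =====
-- stated objective: alternative
-- what changed: B run-length-encodes the membership sequence into (key, length) runs and then computes the count as the sum of True-run lengths and the two maxima as max over run lengths (default 0), instead of A's single stateful while loop with five counters.
import Mathlib
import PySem

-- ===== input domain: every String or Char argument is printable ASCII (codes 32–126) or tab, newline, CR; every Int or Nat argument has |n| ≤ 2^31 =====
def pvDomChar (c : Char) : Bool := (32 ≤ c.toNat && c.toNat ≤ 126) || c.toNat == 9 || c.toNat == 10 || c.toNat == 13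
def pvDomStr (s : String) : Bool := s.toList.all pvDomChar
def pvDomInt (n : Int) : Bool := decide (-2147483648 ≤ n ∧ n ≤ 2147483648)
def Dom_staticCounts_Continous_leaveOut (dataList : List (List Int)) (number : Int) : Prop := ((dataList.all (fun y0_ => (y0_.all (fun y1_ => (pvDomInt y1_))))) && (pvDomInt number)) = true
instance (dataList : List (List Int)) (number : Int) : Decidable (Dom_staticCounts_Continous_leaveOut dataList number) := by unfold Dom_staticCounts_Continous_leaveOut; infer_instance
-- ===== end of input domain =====

-- B replaces A's five-counter while loop by run-length-encoding the membership sequence and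
-- aggregating over the runs (objective: alternative decomposition, same cost).

-- ===== PORT A =====
-- the while loop of A, one recursive step per index, same five counters
def pvALoop (number : Int) (l : List (List Int))
    (countsNumber continousNumber leave_outNumber maxContinous maxLeaveNumber : Int) :
    Int × Int × Int :=
  match l with
  | [] => (countsNumber, maxContinous, maxLeaveNumber)
  | x :: rest =>
    if x.contains number then
      let countsNumber := countsNumber + 1
      let continousNumber := continousNumber + 1
      let maxContinous := if continousNumber > maxContinous then continousNumber else maxContinous
      pvALoop number rest countsNumber continousNumber 0 maxContinous maxLeaveNumber
    else
      let leave_outNumber := leave_outNumber + 1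
      let maxLeaveNumber := if leave_outNumber > maxLeaveNumber then leave_outNumber else maxLeaveNumber
      pvALoop number rest countsNumber 0 leave_outNumber maxContinous maxLeaveNumber

def staticCounts_Continous_leaveOut (dataList : List (List Int)) (number : Int) : Int × Int × Int :=
  pvALoop number dataList 0 0 0 0 0

-- ===== PORT B =====
-- one loop step of B: extend the most recent run or open a new one (most recent first)
def pvBStep (runs : List (Bool × Int)) (m : Bool) : List (Bool × Int) :=
  match runs with
  | (k, l) :: t => if k == m then (m, l + 1) :: t else (m, 1) :: (k, l) :: t
  | [] => [(m, 1)]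

-- Python's max(lens, default=0)
def pvMaxD0 : List Int → Int
  | [] => 0
  | h :: t => t.foldl max h

def staticCounts_Continous_leaveOut_alt (dataList : List (List Int)) (number : Int) : Int × Int × Int :=
  let ms := dataList.map (fun x => x.contains number)
  let runs := ms.foldl pvBStep []
  let trueLens := (runs.filter (fun p => p.1)).map (fun p => p.2)
  let falseLens := (runs.filter (fun p => !p.1)).map (fun p => p.2)
  (trueLens.foldl (· + ·) 0, pvMaxD0 trueLens, pvMaxD0 falseLens)

-- ===== PRECONDITION & SPEC =====
def Spec_staticCounts_Continous_leaveOut (dataList : List (List Int)) (number : Int) (out : Int × Int × Int) : Prop := out = staticCounts_Continous_leaveOut_alt dataList number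
instance (dataList : List (List Int)) (number : Int) (out : Int × Int × Int) : Decidable (Spec_staticCounts_Continous_leaveOut dataList number out) := by unfold Spec_staticCounts_Continous_leaveOut; infer_instance

-- ===== CLAIM (what is proved, stated in full; the proofs are below) =====
def Claim_equal_staticCounts_Continous_leaveOut : Prop := ∀ (dataList : List (List Int)) (number : Int), Dom_staticCounts_Continous_leaveOut dataList number → Spec_staticCounts_Continous_leaveOut dataList number (staticCounts_Continous_leaveOut dataList number)

-- ===== LEMMAS AND PROOFS =====

-- aggregates of a run list (B's three results), and the head projections matching A's counters
def pvLensT (t : List (Bool × Int)) : List Int := (t.filter (fun p => p.1)).map (fun p => p.2)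
def pvLensF (t : List (Bool × Int)) : List Int := (t.filter (fun p => !p.1)).map (fun p => p.2)
def pvSumT (runs : List (Bool × Int)) : Int := (pvLensT runs).foldl (· + ·) 0
def pvMaxT (runs : List (Bool × Int)) : Int := pvMaxD0 (pvLensT runs)
def pvMaxF (runs : List (Bool × Int)) : Int := pvMaxD0 (pvLensF runs)
def pvHeadT (runs : List (Bool × Int)) : Int :=
  match runs with
  | (true, l) :: _ => l
  | _ => 0
def pvHeadF (runs : List (Bool × Int)) : Int :=
  match runs with
  | (false, l) :: _ => l
  | _ => 0

lemma foldl_max_right (t : List Int) (a b : Int) :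
    t.foldl max (max a b) = max (t.foldl max a) b := by
  induction t generalizing a with
  | nil => rfl
  | cons c t ih =>
    simp only [List.foldl_cons]
    rw [show max (max a b) c = max (max a c) b by omega, ih]

lemma foldl_add_init (t : List Int) (a : Int) :
    t.foldl (· + ·) a = a + t.foldl (· + ·) 0 := by
  induction t generalizing a with
  | nil => simp
  | cons c t ih =>
    simp only [List.foldl_cons]
    rw [ih (a + c), ih (0 + c)]; ring

lemma pvMaxT_true (runs : List (Bool × Int)) :
    (if pvHeadT runs + 1 > pvMaxT runs then pvHeadT runs + 1 else pvMaxT runs)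
      = pvMaxT (pvBStep runs true) := by
  match runs with
  | [] => simp [pvHeadT, pvMaxT, pvBStep, pvMaxD0, pvLensT]
  | (true, l) :: t =>
    show (if l + 1 > (pvLensT t).foldl max l then l + 1 else (pvLensT t).foldl max l)
        = (pvLensT t).foldl max (l + 1)
    have h := foldl_max_right (pvLensT t) l (l + 1)
    rw [show max l (l + 1) = l + 1 by omega] at h
    rw [h]; split_ifs <;> omega
  | (false, l) :: t =>
    show (if (0 : Int) + 1 > pvMaxD0 (pvLensT t) then (0 : Int) + 1 else pvMaxD0 (pvLensT t))
        = pvMaxD0 (1 :: pvLensT t)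
    cases hc : pvLensT t with
    | nil => simp [pvMaxD0]
    | cons c cs =>
      show (if (0 : Int) + 1 > pvMaxD0 (c :: cs) then (0 : Int) + 1 else pvMaxD0 (c :: cs))
          = cs.foldl max (max 1 c)
      rw [show max (1 : Int) c = max c 1 by omega, foldl_max_right]
      show (if (0 : Int) + 1 > cs.foldl max c then (0 : Int) + 1 else cs.foldl max c)
          = max (cs.foldl max c) 1
      split_ifs <;> omega

lemma pvMaxF_false (runs : List (Bool × Int)) :
    (if pvHeadF runs + 1 > pvMaxF runs then pvHeadF runs + 1 else pvMaxF runs)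
      = pvMaxF (pvBStep runs false) := by
  match runs with
  | [] => simp [pvHeadF, pvMaxF, pvBStep, pvMaxD0, pvLensF]
  | (false, l) :: t =>
    show (if l + 1 > (pvLensF t).foldl max l then l + 1 else (pvLensF t).foldl max l)
        = (pvLensF t).foldl max (l + 1)
    have h := foldl_max_right (pvLensF t) l (l + 1)
    rw [show max l (l + 1) = l + 1 by omega] at h
    rw [h]; split_ifs <;> omega
  | (true, l) :: t =>
    show (if (0 : Int) + 1 > pvMaxD0 (pvLensF t) then (0 : Int) + 1 else pvMaxD0 (pvLensF t))
        = pvMaxD0 (1 :: pvLensF t)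
    cases hc : pvLensF t with
    | nil => simp [pvMaxD0]
    | cons c cs =>
      show (if (0 : Int) + 1 > pvMaxD0 (c :: cs) then (0 : Int) + 1 else pvMaxD0 (c :: cs))
          = cs.foldl max (max 1 c)
      rw [show max (1 : Int) c = max c 1 by omega, foldl_max_right]
      show (if (0 : Int) + 1 > cs.foldl max c then (0 : Int) + 1 else cs.foldl max c)
          = max (cs.foldl max c) 1
      split_ifs <;> omega

lemma pvSumT_true (runs : List (Bool × Int)) :
    pvSumT runs + 1 = pvSumT (pvBStep runs true) := by
  match runs with
  | [] => decide
  | (true, l) :: t =>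
    show (pvLensT t).foldl (· + ·) (0 + l) + 1 = (pvLensT t).foldl (· + ·) (0 + (l + 1))
    rw [foldl_add_init _ (0 + l), foldl_add_init _ (0 + (l + 1))]; ring
  | (false, l) :: t =>
    show (pvLensT t).foldl (· + ·) 0 + 1 = (pvLensT t).foldl (· + ·) (0 + 1)
    rw [foldl_add_init _ (0 + 1)]; ring

-- the invariant: running A's loop from the state described by a run list
-- equals B's aggregation of the run list after folding the rest of the input
lemma pv_main (l : List (List Int)) (number : Int) (runs : List (Bool × Int)) :
    pvALoop number l (pvSumT runs) (pvHeadT runs) (pvHeadF runs) (pvMaxT runs) (pvMaxF runs)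
      = (pvSumT ((l.map (fun x => x.contains number)).foldl pvBStep runs),
         pvMaxT ((l.map (fun x => x.contains number)).foldl pvBStep runs),
         pvMaxF ((l.map (fun x => x.contains number)).foldl pvBStep runs)) := by
  induction l generalizing runs with
  | nil => simp [pvALoop]
  | cons x rest ih =>
    simp only [List.map_cons, List.foldl_cons]
    by_cases hm : x.contains number = true
    · rw [show pvALoop number (x :: rest) (pvSumT runs) (pvHeadT runs) (pvHeadF runs) (pvMaxT runs) (pvMaxF runs)
          = pvALoop number rest (pvSumT runs + 1) (pvHeadT runs + 1) 0
              (if pvHeadT runs + 1 > pvMaxT runs then pvHeadT runs + 1 else pvMaxT runs) (pvMaxF runs) by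
          simp only [pvALoop, hm, if_true]]
      rw [hm]
      rw [pvMaxT_true runs, pvSumT_true runs,
          show pvHeadT runs + 1 = pvHeadT (pvBStep runs true) by
            match runs with
            | [] => decide
            | (true, l) :: t => rfl
            | (false, l) :: t => rfl,
          show (0 : Int) = pvHeadF (pvBStep runs true) by
            match runs with
            | [] => rfl
            | (true, l) :: t => rfl
            | (false, l) :: t => rfl,
          show pvMaxF runs = pvMaxF (pvBStep runs true) by
            match runs with
            | [] => rfl
            | (true, l) :: t => rfl
            | (false, l) :: t => rfl]
      exact ih (pvBStep runs true)
    · simp only [Bool.not_eq_true] at hm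
      rw [show pvALoop number (x :: rest) (pvSumT runs) (pvHeadT runs) (pvHeadF runs) (pvMaxT runs) (pvMaxF runs)
          = pvALoop number rest (pvSumT runs) 0 (pvHeadF runs + 1)
              (pvMaxT runs) (if pvHeadF runs + 1 > pvMaxF runs then pvHeadF runs + 1 else pvMaxF runs) by
          simp only [pvALoop, hm, Bool.false_eq_true, if_false]]
      rw [hm]
      rw [pvMaxF_false runs,
          show pvSumT runs = pvSumT (pvBStep runs false) by
            match runs with
            | [] => rfl
            | (true, l) :: t => rfl
            | (false, l) :: t => rfl,
          show (0 : Int) = pvHeadT (pvBStep runs false) by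
            match runs with
            | [] => rfl
            | (true, l) :: t => rfl
            | (false, l) :: t => rfl,
          show pvHeadF runs + 1 = pvHeadF (pvBStep runs false) by
            match runs with
            | [] => decide
            | (true, l) :: t => rfl
            | (false, l) :: t => rfl,
          show pvMaxT runs = pvMaxT (pvBStep runs false) by
            match runs with
            | [] => rfl
            | (true, l) :: t => rfl
            | (false, l) :: t => rfl]
      exact ih (pvBStep runs false)

-- ===== VERDICT (by name: the statement is the Claim_ definition above) =====
theorem staticCounts_Continous_leaveOut_spec : Claim_equal_staticCounts_Continous_leaveOut := by
  intro dataList number _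
  show _ = _
  have h := pv_main dataList number []
  simpa [staticCounts_Continous_leaveOut, staticCounts_Continous_leaveOut_alt,
    pvSumT, pvHeadT, pvHeadF, pvMaxT, pvMaxF, pvMaxD0, pvLensT, pvLensF] using h
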